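-- pv_equiv track=rewrite | github.com/Sukeedori/PROYECTOS_ARDUINO | Arduino-music/Time.py | parse_durations
-- ===== SOURCE A (Python) =====
-- durations_map = {
--     0: 8,   # Corchea (ningún guion)
--     1: 8,   # Corchea (un guion)
--     2: 4,   # Negra (dos guiones)
--     3: 4,   # Negra (tres guiones)
--     4: 2,   # Blanca (cuatro guiones o más)
-- }
--
-- def parse_durations(sequence):
--     durations = []
--
--     # Separar mano/octava de las notas
--     lines = sequence.strip().split('|')
--     notes = lines[1].strip()  # Extraer solo la parte de las notas
--
--     current_duration = 0  # Inicia con duración 0 para acumular si hay '-'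
--
--     # Recorrer las notas y símbolos en la secuencia
--     for char in notes:
--         # Si es una nota, agregamos la duración basada en los guiones anteriores
--         if char.isalpha():
--             duration = durations_map.get(current_duration, 8)  # Si no está, es una corchea
--             durations.append(duration)
--             current_duration = 0  # Reiniciar el contador de guiones
--         elif char == '-':
--             # Incrementar la duración por cada guion
--             current_duration += 1
--
--     return durations
-- ===== SOURCE B (Python) =====
-- durations_map = {
--     0: 8,
--     1: 8,
--     2: 4,
--     3: 4,
--     4: 2,
-- }
--
-- def parse_durations(sequence):
--     # Tokenize instead of accumulating: keep only dashes, turn every letter into a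
--     # separator, then each segment before a separator is the dash-run for one note.
--     notes = sequence.strip().split('|')[1].strip()
--     cleaned = ''.join('-' if c == '-' else ' ' for c in notes if c.isalpha() or c == '-')
--     return [durations_map.get(len(run), 8) for run in cleaned.split(' ')[:-1]]
-- ===== Notes on version B (the rewrite author's own statement) =====
-- stated objective: alternative
-- what changed: Replaces A's stateful scan (dash counter accumulated and reset on each letter) with a tokenize-then-map pass: filter to dashes, turn every letter into a separator, split on it, and map the length of each dash-run before a letter through the durations table.
import Mathlib
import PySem

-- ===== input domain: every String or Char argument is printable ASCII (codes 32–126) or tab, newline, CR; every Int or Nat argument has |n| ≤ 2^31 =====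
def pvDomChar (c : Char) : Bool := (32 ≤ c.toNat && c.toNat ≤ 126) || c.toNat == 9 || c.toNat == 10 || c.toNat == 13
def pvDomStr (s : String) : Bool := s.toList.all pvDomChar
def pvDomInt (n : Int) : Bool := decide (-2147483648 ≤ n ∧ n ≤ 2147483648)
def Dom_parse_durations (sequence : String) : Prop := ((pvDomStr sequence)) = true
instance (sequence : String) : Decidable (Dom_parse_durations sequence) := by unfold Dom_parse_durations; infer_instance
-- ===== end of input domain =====

-- B rewrites A's accumulator/reset scan as tokenize-then-map (letters become separators,
-- segments of dashes are mapped through the table): a different decomposition, same cost.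

-- ===== PORT A =====
-- module constant durations_map (shared by both sources)
def pvDurationsMap : PySem.Dict Int Int :=
  PySem.Dict.ofList [(0, 8), (1, 8), (2, 4), (3, 4), (4, 2)]

def parse_durations (sequence : String) : List Int :=
  let lines := PySem.Chars.splitOn (PySem.Chars.strip sequence.toList) ['|']
  let notes := PySem.Chars.strip ((PySem.List.pyGet? lines 1).getD [])  -- lines[1]: IndexError (= none) excluded by Pre_
  (notes.foldl (fun (st : List Int × Int) char =>
      if PySem.Chars.isalpha char then
        (st.1 ++ [pvDurationsMap.getD st.2 8], 0)
      else if char = '-' then (st.1, st.2 + 1)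
      else st) ([], 0)).1

-- ===== PORT B =====
-- cleaned = ''.join('-' if c == '-' else ' ' for c in notes if c.isalpha() or c == '-')
def pvClean (cs : List Char) : List Char :=
  (cs.filter (fun c => PySem.Chars.isalpha c || c == '-')).map (fun c => if c = '-' then '-' else ' ')

def parse_durations_alt (sequence : String) : List Int :=
  let notes := PySem.Chars.strip
    ((PySem.List.pyGet? (PySem.Chars.splitOn (PySem.Chars.strip sequence.toList) ['|']) 1).getD [])
  let cleaned := pvClean notes
  ((PySem.Chars.splitOn cleaned [' ']).dropLast).map
    (fun run => pvDurationsMap.getD (run.length : Int) 8)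

-- ===== PRECONDITION & SPEC =====
-- Pre_ excludes exactly the inputs where A raises IndexError: the stripped sequence contains no '|'.
def Pre_parse_durations (sequence : String) : Prop :=
  '|' ∈ PySem.Chars.strip sequence.toList
instance (sequence : String) : Decidable (Pre_parse_durations sequence) := by
  unfold Pre_parse_durations; infer_instance

def pvWitness_parse_durations : String := "RH | a--b c"

def Spec_parse_durations (sequence : String) (out : List Int) : Prop := out = parse_durations_alt sequence
instance (sequence : String) (out : List Int) : Decidable (Spec_parse_durations sequence out) := by unfold Spec_parse_durations; infer_instance

-- ===== CLAIM (what is proved, stated in full; the proofs are below) =====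
def Claim_equal_parse_durations : Prop := ∀ (sequence : String), Dom_parse_durations sequence → Pre_parse_durations sequence → Spec_parse_durations sequence (parse_durations sequence)

-- ===== LEMMAS AND PROOFS =====

-- structural model of Python's s.split(sep) for a one-character separator
def pvSplit (sep : Char) : List Char → List (List Char)
  | [] => [[]]
  | c :: cs => if c = sep then [] :: pvSplit sep cs else (pvSplit sep cs).modifyHead (c :: ·)

-- what A's loop appends given the remaining characters and the pending dash count
def pvG : Int → List Char → List Int
  | _, [] => []
  | n, c :: cs =>
    if PySem.Chars.isalpha c then pvDurationsMap.getD n 8 :: pvG 0 cs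
    else if c = '-' then pvG (n + 1) cs
    else pvG n cs

theorem pvSplit_ne_nil (sep : Char) (l : List Char) : pvSplit sep l ≠ [] := by
  induction l with
  | nil => simp [pvSplit]
  | cons c cs ih =>
    simp only [pvSplit]
    split_ifs
    · simp
    · cases h : pvSplit sep cs with
      | nil => exact absurd h ih
      | cons a t => simp [List.modifyHead]

theorem pvGo_spec (sep : Char) (l : List Char) : ∀ (fuel : Nat), l.length < fuel →
    ∀ (cur : List Char) (acc : List (List Char)),
    PySem.Chars.splitOn.go [sep] fuel l cur acc
      = acc.reverse ++ (pvSplit sep l).modifyHead (cur.reverse ++ ·) := by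
  induction l with
  | nil =>
    intro fuel hf cur acc
    cases fuel with
    | zero => omega
    | succ f => simp [PySem.Chars.splitOn.go, pvSplit, List.modifyHead]
  | cons c cs ih =>
    intro fuel hf cur acc
    cases fuel with
    | zero => simp at hf
    | succ f =>
      rw [PySem.Chars.splitOn.go]
      by_cases hc : c = sep
      · subst hc
        have hpre : List.isPrefixOf [c] (c :: cs) = true := by
          simp [List.isPrefixOf]
        simp only [hpre, if_pos]
        have hdrop : List.drop [c].length (c :: cs) = cs := by simp
        rw [hdrop, ih f (by simpa using hf) [] (cur.reverse :: acc)]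
        simp only [pvSplit, if_pos, List.modifyHead, List.reverse_cons, List.append_assoc,
          List.cons_append, List.nil_append]
        cases hx : pvSplit c cs <;> simp
      · have hpre : List.isPrefixOf [sep] (c :: cs) = false := by
          simp [List.isPrefixOf, Ne.symm hc]
        simp only [hpre]
        rw [if_neg (by simp)]
        rw [ih f (by simpa using hf) (c :: cur) acc]
        have hne := pvSplit_ne_nil sep cs
        cases h : pvSplit sep cs with
        | nil => exact absurd h hne
        | cons a t => simp [pvSplit, hc, h, List.modifyHead]

theorem pvSplitOn_eq (sep : Char) (l : List Char) :
    PySem.Chars.splitOn l [sep] = pvSplit sep l := by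
  have h := pvGo_spec sep l (l.length + 1) (by omega) [] []
  have hne := pvSplit_ne_nil sep l
  cases hs : pvSplit sep l with
  | nil => exact absurd hs hne
  | cons a t =>
    simpa [PySem.Chars.splitOn, hs, List.modifyHead] using h

theorem pvSplit_append_no_sep (sep : Char) (pre x : List Char) (h : sep ∉ pre) :
    pvSplit sep (pre ++ x) = (pvSplit sep x).modifyHead (pre ++ ·) := by
  induction pre with
  | nil =>
    cases hx : pvSplit sep x with
    | nil => exact absurd hx (pvSplit_ne_nil sep x)
    | cons a t => simp only [hx, List.modifyHead, List.nil_append]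
  | cons c cs ih =>
    have hc : ¬ c = sep := by
      intro hcc; exact h (hcc ▸ List.mem_cons_self)
    have hmem : sep ∉ cs := fun hm => h (List.mem_cons_of_mem _ hm)
    have hne := pvSplit_ne_nil sep x
    cases hx : pvSplit sep x with
    | nil => exact absurd hx hne
    | cons a t =>
      simp only [List.cons_append, pvSplit, if_neg hc, ih hmem, hx, List.modifyHead]

theorem pvIsalpha_dash : PySem.Chars.isalpha '-' = false := by decide

theorem pvA_loop (cs : List Char) : ∀ (acc : List Int) (n : Int),
    (cs.foldl (fun (st : List Int × Int) char =>
      if PySem.Chars.isalpha char then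
        (st.1 ++ [pvDurationsMap.getD st.2 8], 0)
      else if char = '-' then (st.1, st.2 + 1)
      else st) (acc, n)).1 = acc ++ pvG n cs := by
  induction cs with
  | nil => intro acc n; simp [pvG]
  | cons c cs ih =>
    intro acc n
    simp only [List.foldl_cons, pvG]
    by_cases ha : PySem.Chars.isalpha c
    · simp only [ha, if_pos]
      rw [ih]
      simp
    · by_cases hd : c = '-'
      · subst hd; simp [pvIsalpha_dash, ih]
      · simp [ha, hd, ih]

theorem pvSpace_not_mem_replicate (n : Nat) : (' ' : Char) ∉ List.replicate n '-' := by
  intro h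
  have := List.eq_of_mem_replicate h
  simp at this

theorem pvB_side (cs : List Char) : ∀ (n : Nat),
    ((pvSplit ' ' (List.replicate n '-' ++ pvClean cs)).dropLast).map
      (fun run => pvDurationsMap.getD (run.length : Int) 8) = pvG (n : Int) cs := by
  induction cs with
  | nil =>
    intro n
    rw [show pvClean [] = [] from rfl, List.append_nil,
      show (List.replicate n '-') = (List.replicate n '-') ++ [] from (List.append_nil _).symm,
      pvSplit_append_no_sep ' ' _ [] (pvSpace_not_mem_replicate n)]
    simp [pvSplit, pvG, List.modifyHead]
  | cons c cs ih =>
    intro n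
    by_cases ha : PySem.Chars.isalpha c
    · have hcd : ¬ c = '-' := by
        intro h; rw [h] at ha; exact absurd ha (by rw [pvIsalpha_dash]; simp)
      have hclean : pvClean (c :: cs) = ' ' :: pvClean cs := by
        simp [pvClean, ha, hcd]
      rw [hclean, pvSplit_append_no_sep ' ' _ _ (pvSpace_not_mem_replicate n)]
      rw [show pvSplit ' ' (' ' :: pvClean cs) = [] :: pvSplit ' ' (pvClean cs) from by
        simp [pvSplit]]
      have hne := pvSplit_ne_nil ' ' (pvClean cs)
      rw [List.modifyHead, List.dropLast_cons_of_ne_nil hne, List.map_cons]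
      have ht := ih 0
      simp only [List.replicate, List.nil_append, Nat.cast_zero] at ht
      simp only [pvG, ha, if_pos, ht, List.append_nil, List.length_replicate]
    · by_cases hd : c = '-'
      · have hclean : pvClean (c :: cs) = '-' :: pvClean cs := by
          simp [pvClean, hd]
        rw [hclean, show List.replicate n '-' ++ '-' :: pvClean cs
              = List.replicate (n + 1) '-' ++ pvClean cs from by
            rw [List.replicate_succ']; simp]
        rw [ih (n + 1)]
        subst hd
        simp [pvG, pvIsalpha_dash, Nat.cast_add, Nat.cast_one]
      · have hclean : pvClean (c :: cs) = pvClean cs := by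
          simp [pvClean, ha, hd]
        rw [hclean, ih n]
        simp [pvG, ha, hd]

-- ===== VERDICT (by name: the statement is the Claim_ definition above) =====
theorem parse_durations_spec : Claim_equal_parse_durations := by
  intro s _hd _hp
  unfold Spec_parse_durations parse_durations parse_durations_alt
  simp only []
  generalize PySem.Chars.strip
    ((PySem.List.pyGet? (PySem.Chars.splitOn (PySem.Chars.strip s.toList) ['|']) 1).getD []) = notes
  rw [pvA_loop notes [] 0, pvSplitOn_eq ' ' (pvClean notes)]
  have h := pvB_side notes 0
  simp only [List.replicate, List.nil_append, Nat.cast_zero] at h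
  rw [h]
  simp
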